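-- pv_equiv track=rewrite | github.com/NR7KINGithub/Data_Structures | 1/Magical_Sequence_Transformation.py | solve
-- ===== SOURCE A (Python) =====
-- def solve(s: str) -> int:
--     stack = []
--     power = 0
--
--     for ch in s:
--         if stack and ((stack[-1] == 'X' and ch == 'Y') or (stack[-1] == 'Y' and ch == 'X')):
--             stack.pop()
--             power += 1
--
--         else:
--             stack.append(ch)
--
--     return power
-- ===== SOURCE B (Python) =====
-- def solve(s: str) -> int:
--     # Count X/Y in each maximal run of X/Y characters; cancellations per run = min(#X, #Y).
--     power = 0
--     x = y = 0
--     for ch in s: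
--         if ch == 'X':
--             x += 1
--         elif ch == 'Y':
--             y += 1
--         else:
--             power += min(x, y)
--             x = y = 0
--     return power + min(x, y)
-- ===== Notes on version B (the rewrite author's own statement) =====
-- stated objective: simpler
-- what changed: Replaces the explicit list stack with two integer counters: since the stack within any maximal X/Y run is always a run of one letter, B just counts X's and Y's per segment and adds min(#X,#Y) at each segment boundary.
import Mathlib
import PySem

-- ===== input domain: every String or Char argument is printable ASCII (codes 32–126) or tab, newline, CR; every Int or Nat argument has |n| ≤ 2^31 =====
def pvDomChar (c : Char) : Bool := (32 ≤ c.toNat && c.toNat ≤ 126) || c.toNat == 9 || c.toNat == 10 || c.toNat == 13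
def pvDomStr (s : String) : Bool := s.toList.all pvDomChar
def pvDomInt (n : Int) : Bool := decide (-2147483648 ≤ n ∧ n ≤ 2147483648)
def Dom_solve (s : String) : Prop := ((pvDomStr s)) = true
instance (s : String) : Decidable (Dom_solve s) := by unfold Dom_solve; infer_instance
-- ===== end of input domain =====

-- B replaces A's explicit stack with two per-segment counters (O(1) space): simpler state, same O(n) time.

-- ===== PORT A =====
-- A's stack is stored top-first (Python's append/pop at the list's end become cons/tail at the head).
def solveStepA (st : List Char × Int) (ch : Char) : List Char × Int :=
  match st with
  | (top :: rest, power) =>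
      if (top = 'X' ∧ ch = 'Y') ∨ (top = 'Y' ∧ ch = 'X') then (rest, power + 1)
      else (ch :: top :: rest, power)
  | ([], power) => ([ch], power)

def solve (s : String) : Int :=
  (s.toList.foldl solveStepA ([], 0)).2

-- ===== PORT B =====
def solveStepB (st : Int × Int × Int) (ch : Char) : Int × Int × Int :=
  let (x, y, power) := st
  if ch = 'X' then (x + 1, y, power)
  else if ch = 'Y' then (x, y + 1, power)
  else (0, 0, power + min x y)

def solve_alt (s : String) : Int :=
  let (x, y, power) := s.toList.foldl solveStepB (0, 0, 0)
  power + min x y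

-- ===== PRECONDITION & SPEC =====
def Spec_solve (s : String) (out : Int) : Prop := out = solve_alt s
instance (s : String) (out : Int) : Decidable (Spec_solve s out) := by unfold Spec_solve; infer_instance

-- ===== CLAIM (what is proved, stated in full; the proofs are below) =====
def Claim_equal_solve : Prop := ∀ (s : String), Dom_solve s → Spec_solve s (solve s)

-- ===== LEMMAS AND PROOFS =====

-- Invariant tying A's state (stack, pa) to B's state (x, y, pb):
-- the stack is a run of |x - y| copies of the majority letter on top of a blocked rest,
-- and A's power equals B's power plus the min of the current segment's counters.
def StackInv (stack : List Char) (pa : Int) (x y pb : Int) : Prop :=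
  0 ≤ x ∧ 0 ≤ y ∧ pa = pb + min x y ∧
  ∃ rest : List Char,
    stack = List.replicate (x - y).toNat 'X' ++ List.replicate (y - x).toNat 'Y' ++ rest ∧
    (∀ c, rest.head? = some c → c ≠ 'X' ∧ c ≠ 'Y')

theorem inv_step (stack : List Char) (pa x y pb : Int) (ch : Char)
    (h : StackInv stack pa x y pb) :
    StackInv (solveStepA (stack, pa) ch).1 (solveStepA (stack, pa) ch).2
        (solveStepB (x, y, pb) ch).1 (solveStepB (x, y, pb) ch).2.1
        (solveStepB (x, y, pb) ch).2.2 := by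
  obtain ⟨hx, hy, hp, rest, hst, hrest⟩ := h
  by_cases hX : ch = 'X'
  · subst hX
    have hB : solveStepB (x, y, pb) 'X' = (x + 1, y, pb) := by simp [solveStepB]
    rw [hB]
    show StackInv _ _ (x + 1) y pb
    by_cases hlt : x < y
    · -- top is 'Y': A cancels, matching the min going up by one
      have hx0 : (x - y).toNat = 0 := by omega
      have hy1 : (y - x).toNat = (y - (x + 1)).toNat + 1 := by omega
      have hA : solveStepA (stack, pa) 'X' =
          (List.replicate (y - (x + 1)).toNat 'Y' ++ rest, pa + 1) := by
        rw [hst, hx0, hy1]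
        simp [solveStepA, List.replicate_succ]
      rw [hA]
      have hx0' : (x + 1 - y).toNat = 0 := by omega
      exact ⟨by omega, by omega, by simp; omega, rest, by rw [hx0']; simp, hrest⟩
    · -- A pushes 'X'
      have hy0 : (y - x).toNat = 0 := by omega
      have hsucc : (x + 1 - y).toNat = (x - y).toNat + 1 := by omega
      have hA : solveStepA (stack, pa) 'X' =
          (List.replicate (x + 1 - y).toNat 'X' ++ List.replicate (y - (x + 1)).toNat 'Y' ++ rest,
           pa) := by
        have hy0' : (y - (x + 1)).toNat = 0 := by omega
        rw [hst, hy0, hy0', hsucc, List.replicate_succ]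
        rcases hxy : (x - y).toNat with _ | n
        · cases hr : rest with
          | nil => simp [solveStepA]
          | cons c t =>
            have hc := hrest c (by simp [hr])
            simp [solveStepA, hc.1, hc.2]
        · simp [solveStepA, List.replicate_succ]
      rw [hA]
      exact ⟨by omega, hy, by rw [hp]; simp; omega, rest, rfl, hrest⟩
  · by_cases hY : ch = 'Y'
    · subst hY
      have hB : solveStepB (x, y, pb) 'Y' = (x, y + 1, pb) := by simp [solveStepB]
      rw [hB]
      show StackInv _ _ x (y + 1) pb
      by_cases hlt : y < x
      · have hy0 : (y - x).toNat = 0 := by omega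
        have hx1 : (x - y).toNat = (x - (y + 1)).toNat + 1 := by omega
        have hA : solveStepA (stack, pa) 'Y' =
            (List.replicate (x - (y + 1)).toNat 'X' ++ rest, pa + 1) := by
          rw [hst, hy0, hx1]
          simp [solveStepA, List.replicate_succ]
        rw [hA]
        have hy0' : (y + 1 - x).toNat = 0 := by omega
        refine ⟨hx, by omega, by simp; omega, rest, ?_, hrest⟩
        rw [hy0']; simp
      · have hx0 : (x - y).toNat = 0 := by omega
        have hsucc : (y + 1 - x).toNat = (y - x).toNat + 1 := by omega
        have hA : solveStepA (stack, pa) 'Y' =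
            (List.replicate (x - (y + 1)).toNat 'X' ++ List.replicate (y + 1 - x).toNat 'Y' ++ rest,
             pa) := by
          have hx0' : (x - (y + 1)).toNat = 0 := by omega
          rw [hst, hx0, hx0', hsucc, List.replicate_succ]
          rcases hxy : (y - x).toNat with _ | n
          · cases hr : rest with
            | nil => simp [solveStepA]
            | cons c t =>
              have hc := hrest c (by simp [hr])
              simp [solveStepA, hc.1, hc.2]
          · simp [solveStepA, List.replicate_succ]
        rw [hA]
        exact ⟨hx, by omega, by rw [hp]; simp; omega, rest, rfl, hrest⟩
    · -- other char: A pushes it (a non-X/Y top never cancels), B closes the segment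
      have hB : solveStepB (x, y, pb) ch = (0, 0, pb + min x y) := by
        simp [solveStepB, hX, hY]
      rw [hB]
      show StackInv _ _ 0 0 (pb + min x y)
      have hA : solveStepA (stack, pa) ch = (ch :: stack, pa) := by
        rcases hst' : stack with _ | ⟨c, t⟩
        · simp [solveStepA]
        · have hc : ¬ ((c = 'X' ∧ ch = 'Y') ∨ (c = 'Y' ∧ ch = 'X')) := by
            rintro (⟨_, h⟩ | ⟨_, h⟩) <;> [exact hY h; exact hX h]
          simp [solveStepA, hc]
      rw [hA]
      refine ⟨le_refl 0, le_refl 0, by simpa using hp, ch :: stack, by simp, ?_⟩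
      intro c hc
      simp at hc
      subst hc
      exact ⟨hX, hY⟩

theorem inv_foldl (l : List Char) (stack : List Char) (pa x y pb : Int)
    (h : StackInv stack pa x y pb) :
    StackInv (l.foldl solveStepA (stack, pa)).1 (l.foldl solveStepA (stack, pa)).2
        (l.foldl solveStepB (x, y, pb)).1 (l.foldl solveStepB (x, y, pb)).2.1
        (l.foldl solveStepB (x, y, pb)).2.2 := by
  induction l generalizing stack pa x y pb with
  | nil => exact h
  | cons ch t ih =>
    have h' := inv_step stack pa x y pb ch h
    simpa [List.foldl_cons] using
      ih (solveStepA (stack, pa) ch).1 (solveStepA (stack, pa) ch).2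
        (solveStepB (x, y, pb) ch).1 (solveStepB (x, y, pb) ch).2.1
        (solveStepB (x, y, pb) ch).2.2 h'

-- ===== VERDICT (by name: the statement is the Claim_ definition above) =====
theorem solve_spec : Claim_equal_solve := by
  intro s _
  have h0 : StackInv ([] : List Char) 0 0 0 0 :=
    ⟨le_refl 0, le_refl 0, by simp, [], by simp, by simp⟩
  obtain ⟨_, _, hp, _⟩ := inv_foldl s.toList [] 0 0 0 0 h0
  unfold Spec_solve solve solve_alt
  rw [hp]
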